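-- pv_equiv track=rewrite | github.com/thaddeusj/Cryptopals_Python | vigenere.py | transpose_blocks
-- ===== SOURCE A (Python) =====
-- def transpose_blocks(barray, k):
--
--     transposed_blocks = []
--
--     for block_num in range(0,k):
--         transposed_blocks.append([])
--
--         curr_spot = 0
--
--         while(curr_spot*k + block_num < len(barray)):
--             transposed_blocks[block_num].append(barray[curr_spot*k + block_num])
--             curr_spot +=1
--
--     return transposed_blocks
-- ===== SOURCE B (Python) =====
-- def transpose_blocks(barray, k):
--     blocks = [[] for _ in range(k)]
--     if k > 0:
--         for i, b in enumerate(barray):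
--             blocks[i % k].append(b)
--     return blocks
-- ===== Notes on version B (the rewrite author's own statement) =====
-- stated objective: alternative
-- what changed: Instead of gathering each block column-by-column with repeated random indexing barray[curr_spot*k+block_num] in a nested loop, B pre-creates the k blocks and makes a single enumerate pass over the input, scattering each element into blocks[i % k].
import Mathlib
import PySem

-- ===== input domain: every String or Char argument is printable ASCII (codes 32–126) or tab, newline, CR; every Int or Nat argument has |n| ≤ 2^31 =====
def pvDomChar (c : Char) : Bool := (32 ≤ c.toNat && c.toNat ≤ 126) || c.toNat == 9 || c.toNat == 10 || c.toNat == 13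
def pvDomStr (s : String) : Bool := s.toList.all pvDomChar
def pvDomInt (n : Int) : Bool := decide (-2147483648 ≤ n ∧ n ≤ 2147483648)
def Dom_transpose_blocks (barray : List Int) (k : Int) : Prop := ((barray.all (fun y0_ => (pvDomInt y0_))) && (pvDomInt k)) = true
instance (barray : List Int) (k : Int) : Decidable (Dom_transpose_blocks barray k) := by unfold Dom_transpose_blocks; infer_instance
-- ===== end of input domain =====

-- B replaces A's column-by-column gather (nested while with index arithmetic) by a single
-- enumerate pass scattering each element into blocks[i % k]; objective: alternative decomposition.

-- ===== PORT A =====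
-- inner while loop of A; fuel = barray.length + 1 suffices since the loop runs at most
-- length+1 iterations (index grows by k ≥ 1 each step whenever the loop body is reachable);
-- the `.getD 0` default on pyGet? is unreachable (the guard keeps the index in [0, len)).
def pvWhileA (barray : List Int) (k bn : Int) : Nat → Int → List Int
  | 0, _ => []
  | fuel+1, s =>
    if s * k + bn < (barray.length : Int) then
      (PySem.List.pyGet? barray (s * k + bn)).getD 0 :: pvWhileA barray k bn fuel (s + 1)
    else []

def transpose_blocks (barray : List Int) (k : Int) : List (List Int) :=
  (PySem.List.pyRange 0 k 1).foldl
    (fun acc bn => acc ++ [pvWhileA barray k bn (barray.length + 1) 0]) []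

-- ===== PORT B =====
def transpose_blocks_alt (barray : List Int) (k : Int) : List (List Int) :=
  let blocks := List.replicate k.toNat ([] : List Int)
  if 0 < k then
    (PySem.List.enumerate barray 0).foldl
      (fun bl p => bl.modify (PySem.Int.mod p.1 k).toNat (fun col => col ++ [p.2])) blocks
  else blocks

-- ===== PRECONDITION & SPEC =====
def Spec_transpose_blocks (barray : List Int) (k : Int) (out : List (List Int)) : Prop := out = transpose_blocks_alt barray k
instance (barray : List Int) (k : Int) (out : List (List Int)) : Decidable (Spec_transpose_blocks barray k out) := by unfold Spec_transpose_blocks; infer_instance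

-- ===== CLAIM (what is proved, stated in full; the proofs are below) =====
def Claim_equal_transpose_blocks : Prop := ∀ (barray : List Int) (k : Int), Dom_transpose_blocks barray k → Spec_transpose_blocks barray k (transpose_blocks barray k)

-- ===== LEMMAS AND PROOFS =====

-- Nat-indexed version of A's inner while loop (proof helper)
def pvCol (xs : List Int) (K bn : Nat) : Nat → Nat → List Int
  | 0, _ => []
  | f+1, s =>
    if s * K + bn < xs.length then
      xs.getD (s * K + bn) 0 :: pvCol xs K bn f (s + 1)
    else []

-- common spec: the list of the K columns
def pvSpecMap (xs : List Int) (k : Int) : List (List Int) :=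
  (List.range k.toNat).map (fun bn => pvCol xs k.toNat bn (xs.length + 1) 0)

theorem pvWhileA_eq_pvCol (xs : List Int) (K BN : Nat) :
    ∀ (f : Nat) (S : Nat), pvWhileA xs (K : Int) (BN : Int) f (S : Int) = pvCol xs K BN f S := by
  intro f
  induction f with
  | zero => intro S; rfl
  | succ f ih =>
    intro S
    have hidx : ((S : Int) * (K : Int) + (BN : Int)) = ((S * K + BN : Nat) : Int) := by push_cast; ring
    simp only [pvWhileA, pvCol, hidx, PySem.List.pyGet?_natCast]
    by_cases h : S * K + BN < xs.length
    · rw [if_pos (by exact_mod_cast h), if_pos h]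
      have hs1 : ((S : Int) + 1) = ((S + 1 : Nat) : Int) := by push_cast; ring
      rw [hs1, ih (S + 1), List.getD_eq_getElem?_getD]
    · rw [if_neg (by exact_mod_cast h), if_neg h]

theorem pvCol_stop (xs : List Int) (K bn f s : Nat) (h : xs.length ≤ s * K + bn) :
    pvCol xs K bn f s = [] := by
  cases f with
  | zero => rfl
  | succ f => simp [pvCol, Nat.not_lt.2 h]

theorem pv_s_le (K s bn : Nat) (hK : 0 < K) : s ≤ s * K + bn :=
  le_trans (Nat.le_mul_of_pos_right s hK) (Nat.le_add_right _ _)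

theorem pvCol_fuel (xs : List Int) (K bn : Nat) (hK : 0 < K) :
    ∀ (f f' s : Nat), xs.length + 1 ≤ f + s → xs.length + 1 ≤ f' + s →
      pvCol xs K bn f s = pvCol xs K bn f' s := by
  intro f
  induction f with
  | zero =>
    intro f' s h1 h2
    have : xs.length ≤ s * K + bn := le_trans (by omega) (pv_s_le K s bn hK)
    rw [pvCol_stop xs K bn 0 s this, pvCol_stop xs K bn f' s this]
  | succ f ih =>
    intro f' s h1 h2
    cases f' with
    | zero =>
      have : xs.length ≤ s * K + bn := le_trans (by omega) (pv_s_le K s bn hK)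
      rw [pvCol_stop xs K bn _ s this, pvCol_stop xs K bn 0 s this]
    | succ f' =>
      simp only [pvCol]
      by_cases h : s * K + bn < xs.length
      · rw [if_pos h, if_pos h, ih f' (s + 1) (by omega) (by omega)]
      · rw [if_neg h, if_neg h]

theorem pvGetD_append_lt (xs ys : List Int) (j : Nat) (h : j < xs.length) :
    (xs ++ ys).getD j 0 = xs.getD j 0 := by
  rw [List.getD_eq_getElem?_getD, List.getD_eq_getElem?_getD, List.getElem?_append_left h]

theorem pvGetD_append_self (xs : List Int) (x : Int) :
    (xs ++ [x]).getD xs.length 0 = x := by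
  rw [List.getD_eq_getElem?_getD, List.getElem?_append_right (le_refl _)]
  simp

theorem pvCol_snoc_mem (xs : List Int) (x : Int) (K bn : Nat) (hK : 0 < K) :
    ∀ (f s t : Nat), s ≤ t → t * K + bn = xs.length → xs.length + 2 ≤ f + s →
      pvCol (xs ++ [x]) K bn f s = pvCol xs K bn f s ++ [x] := by
  intro f
  induction f with
  | zero =>
    intro s t hst hL hf
    have := pv_s_le K t bn hK
    have : t ≤ xs.length := by omega
    omega
  | succ f ih =>
    intro s t hst hL hf
    rcases Nat.lt_or_ge s t with hlt | hge
    · have hj : s * K + bn < xs.length := by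
        have : s * K < t * K := (Nat.mul_lt_mul_right hK).2 hlt
        omega
      simp only [pvCol, List.length_append, List.length_singleton]
      rw [if_pos (by omega), if_pos hj, pvGetD_append_lt xs [x] _ hj,
        ih (s + 1) t hlt hL (by omega)]
      simp
    · have hst' : s = t := le_antisymm hst hge
      subst hst'
      simp only [pvCol, List.length_append, List.length_singleton]
      rw [if_pos (by omega), if_neg (by omega), hL, pvGetD_append_self]
      have hmul : (s + 1) * K + bn = s * K + bn + K := by ring
      have hstop : (xs ++ [x]).length ≤ (s + 1) * K + bn := by
        simp only [List.length_append, List.length_singleton]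
        omega
      rw [pvCol_stop (xs ++ [x]) K bn f (s + 1) hstop]
      rfl

theorem pvCol_snoc_not (xs : List Int) (x : Int) (K bn : Nat) (hK : 0 < K)
    (hno : ∀ t, t * K + bn ≠ xs.length) :
    ∀ (f s : Nat), pvCol (xs ++ [x]) K bn f s = pvCol xs K bn f s := by
  intro f
  induction f with
  | zero => intro s; rfl
  | succ f ih =>
    intro s
    rcases Nat.lt_trichotomy (s * K + bn) xs.length with hj | hj | hj
    · simp only [pvCol, List.length_append, List.length_singleton]
      rw [if_pos (by omega), if_pos hj, pvGetD_append_lt xs [x] _ hj, ih (s + 1)]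
    · exact absurd hj (hno s)
    · simp only [pvCol, List.length_append, List.length_singleton]
      rw [if_neg (by omega), if_neg (by omega)]

theorem pv_exists_iff_mod (K bn L : Nat) (hK : 0 < K) (hbn : bn < K) :
    (∃ t, t * K + bn = L) ↔ L % K = bn := by
  constructor
  · rintro ⟨t, rfl⟩
    calc (t * K + bn) % K = (bn + t * K) % K := by rw [Nat.add_comm]
      _ = bn % K := Nat.add_mul_mod_self_right bn t K
      _ = bn := Nat.mod_eq_of_lt hbn
  · intro h
    exact ⟨L / K, by rw [Nat.mul_comm, ← h]; exact Nat.div_add_mod L K⟩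

theorem pv_foldl_append_singleton {α β : Type} (g : α → β) :
    ∀ (l : List α) (acc : List β),
      l.foldl (fun acc x => acc ++ [g x]) acc = acc ++ l.map g := by
  intro l
  induction l with
  | nil => intro acc; simp
  | cons x t ih => intro acc; simp [List.foldl, ih, List.append_assoc]

theorem pvA_eq_specMap (xs : List Int) (k : Int) (hk : 0 < k) :
    transpose_blocks xs k = pvSpecMap xs k := by
  unfold transpose_blocks pvSpecMap
  rw [PySem.List.pyRange_one, pv_foldl_append_singleton, List.nil_append,
    List.map_map]
  have hsub : (k - 0).toNat = k.toNat := by omega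
  rw [hsub]
  apply List.map_congr_left
  intro bn _
  show pvWhileA xs k ((0 : Int) + (bn : Int)) (xs.length + 1) 0 = _
  have hzero : ((0 : Int) + (bn : Int)) = ((bn : Nat) : Int) := by ring
  have hknat : (k : Int) = ((k.toNat : Nat) : Int) := by omega
  rw [hzero, hknat]
  exact pvWhileA_eq_pvCol xs k.toNat bn (xs.length + 1) 0

theorem pv_enumerate_snoc {α : Type} (x : α) :
    ∀ (xs : List α) (s : Int),
      PySem.List.enumerate (xs ++ [x]) s
        = PySem.List.enumerate xs s ++ [(s + (xs.length : Int), x)] := by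
  intro xs
  induction xs with
  | nil => intro s; simp [PySem.List.enumerate_cons, PySem.List.enumerate_nil]
  | cons y t ih =>
    intro s
    simp only [List.cons_append, PySem.List.enumerate_cons, ih (s + 1), List.length_cons]
    congr 2
    push_cast
    ring

theorem pvSpecMap_snoc (xs : List Int) (x : Int) (k : Int) (hk : 0 < k) :
    pvSpecMap (xs ++ [x]) k
      = (pvSpecMap xs k).modify (xs.length % k.toNat) (fun col => col ++ [x]) := by
  have hK : 0 < k.toNat := by omega
  apply List.ext_getElem
  · simp [pvSpecMap]
  · intro bn h1 h2
    have hbn : bn < k.toNat := by simpa [pvSpecMap] using h1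
    rw [List.getElem_modify]
    simp only [pvSpecMap, List.getElem_map, List.getElem_range, List.length_append,
      List.length_singleton]
    by_cases hmod : xs.length % k.toNat = bn
    · rw [if_pos hmod]
      obtain ⟨t, ht⟩ := (pv_exists_iff_mod k.toNat bn xs.length hK hbn).2 hmod
      rw [pvCol_snoc_mem xs x k.toNat bn hK (xs.length + 1 + 1) 0 t (Nat.zero_le t) ht (by omega)]
      congr 1
      exact pvCol_fuel xs k.toNat bn hK _ _ 0 (by omega) (by omega)
    · rw [if_neg hmod]
      have hno : ∀ t, t * k.toNat + bn ≠ xs.length := by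
        intro t ht
        exact hmod ((pv_exists_iff_mod k.toNat bn xs.length hK hbn).1 ⟨t, ht⟩)
      rw [pvCol_snoc_not xs x k.toNat bn hK hno]
      exact pvCol_fuel xs k.toNat bn hK _ _ 0 (by omega) (by omega)

theorem pvAlt_eq_specMap (xs : List Int) (k : Int) (hk : 0 < k) :
    transpose_blocks_alt xs k = pvSpecMap xs k := by
  induction xs using List.reverseRecOn with
  | nil =>
    unfold transpose_blocks_alt pvSpecMap
    rw [if_pos hk]
    simp only [PySem.List.enumerate_nil, List.foldl_nil]
    apply List.ext_getElem
    · simp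
    · intro bn h1 h2
      have hbn : bn < k.toNat := by simpa using h2
      simp [pvCol, List.getElem_replicate]
  | append_singleton xs x ih =>
    unfold transpose_blocks_alt
    rw [if_pos hk, pv_enumerate_snoc, List.foldl_append, List.foldl_cons, List.foldl_nil]
    have hfold : (PySem.List.enumerate xs 0).foldl
        (fun bl p => bl.modify (PySem.Int.mod p.1 k).toNat (fun col => col ++ [p.2]))
        (List.replicate k.toNat ([] : List Int)) = transpose_blocks_alt xs k := by
      unfold transpose_blocks_alt
      rw [if_pos hk]
    rw [hfold, ih, pvSpecMap_snoc xs x k hk]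
    congr 1
    have hknat : (k : Int) = ((k.toNat : Nat) : Int) := by omega
    rw [zero_add, hknat, PySem.Int.mod_natCast]
    exact Int.toNat_natCast _

-- ===== VERDICT (by name: the statement is the Claim_ definition above) =====
theorem transpose_blocks_spec : Claim_equal_transpose_blocks := by
  intro barray k _
  unfold Spec_transpose_blocks
  rcases lt_or_ge 0 k with hk | hk
  · rw [pvA_eq_specMap barray k hk, pvAlt_eq_specMap barray k hk]
  · have hrange : PySem.List.pyRange 0 k 1 = [] := PySem.List.pyRange_one_eq_nil (by omega)
    have hA : transpose_blocks barray k = [] := by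
      unfold transpose_blocks
      rw [hrange]; rfl
    have hB : transpose_blocks_alt barray k = [] := by
      unfold transpose_blocks_alt
      rw [if_neg (by omega)]
      have : k.toNat = 0 := by omega
      rw [this]; rfl
    rw [hA, hB]
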